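-- pv_equiv track=rewrite | github.com/YingjieQiao/Misc | Python/Practice Problems/3x3.py | hor_check
-- ===== SOURCE A (Python) =====
-- def hor_check(ss):
--     sums = []
--     i = 0
--     while i <= 2:
--         S = 0
--         for s in ss:
--             if s[0] == i:
--                 S += s[2]
--         sums.append(S)
--         i += 1
--     if sums[0] == sums[1] and sums[0] == sums[2]:
--         return sums[0]
--     else:
--         return 999
-- ===== SOURCE B (Python) =====
-- def hor_check(ss):
--     sums = [0, 0, 0]
--     for s in ss:
--         if s[0] in (0, 1, 2):
--             sums[s[0]] += s[2]
--     return sums[0] if sums[0] == sums[1] == sums[2] else 999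
-- ===== Notes on version B (the rewrite author's own statement) =====
-- stated objective: simpler
-- what changed: Replaces A's three separate filtered scans over ss (one per row index in a while loop) with a single pass maintaining a 3-slot accumulator, comparing the slots at the end.
import Mathlib
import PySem

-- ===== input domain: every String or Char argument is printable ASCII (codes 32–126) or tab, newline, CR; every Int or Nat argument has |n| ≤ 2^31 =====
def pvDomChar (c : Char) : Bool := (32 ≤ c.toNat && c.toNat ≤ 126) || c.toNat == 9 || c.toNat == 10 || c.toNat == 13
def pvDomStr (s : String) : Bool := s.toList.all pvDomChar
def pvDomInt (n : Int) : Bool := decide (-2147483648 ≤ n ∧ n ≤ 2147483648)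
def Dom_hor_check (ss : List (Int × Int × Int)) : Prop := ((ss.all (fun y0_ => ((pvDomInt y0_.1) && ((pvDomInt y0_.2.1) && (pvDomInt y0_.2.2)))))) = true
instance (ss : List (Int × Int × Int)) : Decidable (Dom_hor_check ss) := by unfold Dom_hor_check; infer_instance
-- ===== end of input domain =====

-- B replaces A's three filtered scans (one per row index) with a single accumulation pass; objective: simpler.

-- ===== PORT A =====
-- inner 'for s in ss: if s[0] == i: S += s[2]' of A's while-loop body
def horRowSum (ss : List (Int × Int × Int)) (i : Int) : Int :=
  ss.foldl (fun S s => if s.1 = i then S + s.2.2 else S) 0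

def hor_check (ss : List (Int × Int × Int)) : Int :=
  -- the while loop i = 0..2 appends one sum per i
  let sums : List Int :=
    (PySem.List.pyRange 0 3 1).foldl (fun sums i => sums ++ [horRowSum ss i]) []
  if sums.getD 0 0 = sums.getD 1 0 ∧ sums.getD 0 0 = sums.getD 2 0 then
    sums.getD 0 0
  else 999

-- ===== PORT B =====
def hor_check_alt (ss : List (Int × Int × Int)) : Int :=
  let t : Int × Int × Int :=
    ss.foldl (fun t s =>
      if s.1 = 0 then (t.1 + s.2.2, t.2.1, t.2.2)
      else if s.1 = 1 then (t.1, t.2.1 + s.2.2, t.2.2)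
      else if s.1 = 2 then (t.1, t.2.1, t.2.2 + s.2.2)
      else t) (0, 0, 0)
  if t.1 = t.2.1 ∧ t.1 = t.2.2 then t.1 else 999

-- ===== PRECONDITION & SPEC =====
def Spec_hor_check (ss : List (Int × Int × Int)) (out : Int) : Prop := out = hor_check_alt ss
instance (ss : List (Int × Int × Int)) (out : Int) : Decidable (Spec_hor_check ss out) := by unfold Spec_hor_check; infer_instance

-- ===== CLAIM (what is proved, stated in full; the proofs are below) =====
def Claim_equal_hor_check : Prop := ∀ (ss : List (Int × Int × Int)), Dom_hor_check ss → Spec_hor_check ss (hor_check ss)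

-- ===== LEMMAS AND PROOFS =====
theorem horRowSum_shift (ss : List (Int × Int × Int)) (i a : Int) :
    ss.foldl (fun S s => if s.1 = i then S + s.2.2 else S) a = a + horRowSum ss i := by
  induction ss generalizing a with
  | nil => simp [horRowSum]
  | cons s t ih =>
    simp only [horRowSum, List.foldl_cons]
    split_ifs <;> rw [ih, ih] <;> simp [horRowSum]; ring

theorem horRowSum_cons (s : Int × Int × Int) (t : List (Int × Int × Int)) (i : Int) :
    horRowSum (s :: t) i = (if s.1 = i then s.2.2 else 0) + horRowSum t i := by
  simp only [horRowSum, List.foldl_cons]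
  split_ifs <;> rw [horRowSum_shift] <;> simp [horRowSum]

theorem hor_check_alt_fold (ss : List (Int × Int × Int)) (a b c : Int) :
    ss.foldl (fun (t : Int × Int × Int) s =>
      if s.1 = 0 then (t.1 + s.2.2, t.2.1, t.2.2)
      else if s.1 = 1 then (t.1, t.2.1 + s.2.2, t.2.2)
      else if s.1 = 2 then (t.1, t.2.1, t.2.2 + s.2.2)
      else t) (a, b, c)
    = (a + horRowSum ss 0, b + horRowSum ss 1, c + horRowSum ss 2) := by
  induction ss generalizing a b c with
  | nil => simp [horRowSum]
  | cons s t ih =>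
    simp only [List.foldl_cons]
    split_ifs with h0 h1 h2 <;> rw [ih] <;>
      simp_all [horRowSum_cons, Prod.ext_iff] <;> omega

-- ===== VERDICT (by name: the statement is the Claim_ definition above) =====
theorem hor_check_spec : Claim_equal_hor_check := by
  intro ss _
  unfold Spec_hor_check hor_check hor_check_alt
  rw [hor_check_alt_fold]
  simp [PySem.List.pyRange]
  rfl
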